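-- pv_equiv track=rewrite | github.com/seemir/normb | source/normality_battery.py | count_astrix
-- ===== SOURCE A (Python) =====
-- def count_astrix(string):
--     """
--     Count the number of statistical tests that passed based on the astrix notation
--
--     Parameters
--     ----------
--     string  : str
--               string with results
--
--     Returns
--     -------
--     Out     : int
--               number of statistical tests that have passed
--     """
--     string = ' ' + string + ' '
--     counts = []
--     temper = []
--     for char in string:
--         if char == '*':
--             temper.append(char)
--             continue
--         else:
--             counts.append(temper)
--             temper = []
--     return len([count for count in counts if count != []])
-- ===== SOURCE B (Python) =====
-- def count_astrix(string):
--     count = 0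
--     prev = ' '
--     for char in string:
--         if char == '*' and prev != '*':
--             count += 1
--         prev = char
--     return count
-- ===== Notes on version B (the rewrite author's own statement) =====
-- stated objective: simpler
-- what changed: Instead of padding the string with spaces, accumulating each asterisk run into a list, collecting the runs into a list of lists and finally filtering out the empty ones, B makes one pass with O(1) state (count and previous char) and increments the count exactly at each run start.
import Mathlib
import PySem

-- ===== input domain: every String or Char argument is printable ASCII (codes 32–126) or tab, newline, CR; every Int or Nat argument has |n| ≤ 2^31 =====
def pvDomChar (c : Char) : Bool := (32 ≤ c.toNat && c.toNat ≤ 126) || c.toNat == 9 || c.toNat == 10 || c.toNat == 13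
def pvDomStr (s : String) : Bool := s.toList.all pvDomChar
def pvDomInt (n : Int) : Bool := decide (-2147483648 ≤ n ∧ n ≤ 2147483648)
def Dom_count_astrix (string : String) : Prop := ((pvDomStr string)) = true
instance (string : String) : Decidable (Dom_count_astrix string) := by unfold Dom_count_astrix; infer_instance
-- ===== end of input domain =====

-- B is a simpler one-pass rewrite: O(1) state (count, previous char) counting run starts,
-- instead of A's space-padding, run-list accumulation and final non-empty filter.

-- ===== PORT A =====
-- ' ' + string + ' ' is ported at the character-list level (Python iterates the chars of the
-- concatenation); the loop is a foldl over the same (counts, temper) state, branches in order.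
def count_astrix (string : String) : Int :=
  let chars : List Char := (' ' :: string.toList) ++ [' ']
  let r : List (List Char) × List Char :=
    chars.foldl
      (fun s char =>
        if char = '*' then (s.1, s.2 ++ [char])
        else (s.1 ++ [s.2], []))
      ([], [])
  ((r.1.filter (fun count => decide (count ≠ []))).length : Int)

-- ===== PORT B =====
def count_astrix_alt (string : String) : Int :=
  let r : Int × Char :=
    string.toList.foldl
      (fun s char =>
        ((if char = '*' ∧ s.2 ≠ '*' then s.1 + 1 else s.1), char))
      (0, ' ')
  r.1

-- ===== PRECONDITION & SPEC =====
def Spec_count_astrix (string : String) (out : Int) : Prop := out = count_astrix_alt string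
instance (string : String) (out : Int) : Decidable (Spec_count_astrix string out) := by unfold Spec_count_astrix; infer_instance

-- ===== CLAIM (what is proved, stated in full; the proofs are below) =====
def Claim_equal_count_astrix : Prop := ∀ (string : String), Dom_count_astrix string → Spec_count_astrix string (count_astrix string)

-- ===== LEMMAS AND PROOFS =====

-- number of flushed non-empty runs, given whether the current run buffer is non-empty
def pvG (b : Bool) : List Char → Nat
  | [] => 0
  | c :: t => if c = '*' then pvG true t else b.toNat + pvG false t

-- number of maximal '*' runs including a trailing one, given in-run flag
def pvN (b : Bool) : List Char → Nat
  | [] => b.toNat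
  | c :: t => if c = '*' then pvN true t else b.toNat + pvN false t

-- number of run starts, given in-run flag
def pvM (b : Bool) : List Char → Nat
  | [] => 0
  | c :: t => (if c = '*' ∧ b = false then 1 else 0) + pvM (c = '*') t

theorem pvA_fold (l : List Char) :
    ∀ (counts : List (List Char)) (temper : List Char),
    (((l.foldl (fun (s : List (List Char) × List Char) char =>
        if char = '*' then (s.1, s.2 ++ [char]) else (s.1 ++ [s.2], [])) (counts, temper)).1).filter
          (fun count => decide (count ≠ []))).length
      = (counts.filter (fun count => decide (count ≠ []))).length + pvG (!temper.isEmpty) l := by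
  induction l with
  | nil => intro counts temper; simp [pvG]
  | cons c t ih =>
    intro counts temper
    by_cases hc : c = '*'
    · subst hc
      simp only [List.foldl_cons, if_true]
      rw [ih]
      have hne : (temper ++ ['*']).isEmpty = false := by simp
      rw [hne]
      simp [pvG]
    · simp only [List.foldl_cons]
      rw [if_neg hc, ih]
      simp [List.filter_append, pvG, hc]
      cases temper <;> simp <;> omega

theorem pvG_append (l : List Char) : ∀ (b : Bool), pvG b (l ++ [' ']) = pvN b l := by
  induction l with
  | nil => intro b; simp [pvG, pvN]
  | cons c t ih =>
    intro b
    by_cases hc : c = '*' <;> simp [pvG, pvN, hc, ih]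

theorem pvN_eq_pvM (l : List Char) : ∀ (b : Bool), pvN b l = b.toNat + pvM b l := by
  induction l with
  | nil => intro b; simp [pvN, pvM]
  | cons c t ih =>
    intro b
    by_cases hc : c = '*'
    · simp [pvN, pvM, hc, ih]
      cases b <;> simp
    · simp [pvN, pvM, hc, ih]

theorem pvB_fold (l : List Char) :
    ∀ (k : Int) (p : Char),
    (l.foldl (fun (s : Int × Char) char =>
        ((if char = '*' ∧ s.2 ≠ '*' then s.1 + 1 else s.1), char)) (k, p)).1
      = k + (pvM (decide (p = '*')) l : Int) := by
  induction l with
  | nil => intro k p; simp [pvM]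
  | cons c t ih =>
    intro k p
    by_cases hc : c = '*'
    · by_cases hp : p = '*'
      · simp [List.foldl_cons, hc, hp, ih, pvM]
      · simp [List.foldl_cons, hc, hp, ih, pvM]
        ring
    · simp [List.foldl_cons, hc, ih, pvM]

-- ===== VERDICT (by name: the statement is the Claim_ definition above) =====
theorem count_astrix_spec : Claim_equal_count_astrix := by
  intro string _
  show _ = _
  unfold count_astrix count_astrix_alt
  simp only []
  rw [pvB_fold]
  have h := pvA_fold ((' ' :: string.toList) ++ [' ']) [] []
  simp only [List.filter_nil, List.length_nil, Nat.zero_add, List.isEmpty_nil,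
    Bool.not_true] at h
  rw [h]
  have h2 : pvG false ((' ' :: string.toList) ++ [' ']) = pvG false (string.toList ++ [' ']) := by
    simp [pvG]
  rw [h2, pvG_append, pvN_eq_pvM]
  simp
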